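-- pv_equiv track=rewrite | github.com/shivam-sid/cryptosuite | operations/ciphers.py | atbash_cipher
-- ===== SOURCE A (Python) =====
-- def atbash_cipher(text: str) -> tuple[bool, str]:
--     result = ""
--     for char in text:
--         if 'a' <= char <= 'z':
--             result += chr(ord('z') - ord(char) + ord('a'))
--         elif 'A' <= char <= 'Z':
--             result += chr(ord('Z') - ord(char) + ord('A'))
--         else:
--             result += char
--     return True, result
-- ===== SOURCE B (Python) =====
-- _LOWER = "abcdefghijklmnopqrstuvwxyz"
-- _UPPER = _LOWER.upper()
-- _TABLE = str.maketrans(_LOWER + _UPPER, _LOWER[::-1] + _UPPER[::-1])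
--
--
-- def atbash_cipher(text: str) -> tuple[bool, str]:
--     return True, text.translate(_TABLE)
-- ===== Notes on version B (the rewrite author's own statement) =====
-- stated objective: idiomatic
-- what changed: Replaces the per-character if/elif arithmetic loop by a translation table built once with str.maketrans and a single text.translate call; non-letters stay unmapped and thus unchanged.
import Mathlib
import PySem

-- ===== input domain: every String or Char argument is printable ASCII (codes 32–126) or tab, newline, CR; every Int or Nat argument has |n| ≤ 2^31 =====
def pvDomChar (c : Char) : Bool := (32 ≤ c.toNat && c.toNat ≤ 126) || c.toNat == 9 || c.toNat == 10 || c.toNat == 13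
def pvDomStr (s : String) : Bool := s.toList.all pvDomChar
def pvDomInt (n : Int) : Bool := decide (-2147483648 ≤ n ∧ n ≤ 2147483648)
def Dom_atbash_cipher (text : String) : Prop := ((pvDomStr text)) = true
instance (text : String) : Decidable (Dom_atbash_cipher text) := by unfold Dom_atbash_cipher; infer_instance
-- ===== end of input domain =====

-- B replaces A's per-character if/elif arithmetic by a 52-entry translation table
-- built once (str.maketrans) and one table-driven translate pass (objective: idiomatic).


-- ===== PORT A =====
-- one character of A's if/elif/else body
def pvAStep (char : Char) : Char :=
  if 'a' ≤ char ∧ char ≤ 'z' then Char.ofNat ('z'.toNat - char.toNat + 'a'.toNat)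
  else if 'A' ≤ char ∧ char ≤ 'Z' then Char.ofNat ('Z'.toNat - char.toNat + 'A'.toNat)
  else char

def atbash_cipher (text : String) : Bool × String :=
  let result := text.toList.foldl (fun result char => result.push (pvAStep char)) ""
  (true, result)

-- ===== PORT B =====
def pvLower : List Char := "abcdefghijklmnopqrstuvwxyz".toList
def pvUpper : List Char := PySem.Chars.upper pvLower
-- str.maketrans of the two alphabet strings onto their reversals (Char-keyed; exact,
-- since translate maps code points one-to-one here)
def pvTable : PySem.Dict Char Char :=
  PySem.Dict.ofList ((pvLower ++ pvUpper).zip (pvLower.reverse ++ pvUpper.reverse))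

def atbash_cipher_alt (text : String) : Bool × String :=
  -- text.translate(_TABLE): mapped chars substituted, unmapped chars unchanged
  (true, String.ofList (text.toList.map (fun c => (pvTable.get? c).getD c)))

-- ===== PRECONDITION & SPEC =====
def Spec_atbash_cipher (text : String) (out : Bool × String) : Prop := out = atbash_cipher_alt text
instance (text : String) (out : Bool × String) : Decidable (Spec_atbash_cipher text out) := by unfold Spec_atbash_cipher; infer_instance

-- ===== CLAIM (what is proved, stated in full; the proofs are below) =====
def Claim_equal_atbash_cipher : Prop := ∀ (text : String), Dom_atbash_cipher text → Spec_atbash_cipher text (atbash_cipher text)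

-- ===== LEMMAS AND PROOFS =====
-- the two per-character maps agree on every ASCII character
set_option maxRecDepth 8000 in
theorem pvStep_eq_table_fin : ∀ n : Fin 128,
    pvAStep (Char.ofNat n.val) = ((pvTable.get? (Char.ofNat n.val)).getD (Char.ofNat n.val)) := by
  decide

theorem pvStep_eq_table (c : Char) (h : c.toNat < 128) :
    pvAStep c = (pvTable.get? c).getD c := by
  have := pvStep_eq_table_fin ⟨c.toNat, h⟩
  simpa [Char.ofNat_toNat] using this

theorem pvFoldl_push (f : Char → Char) (l : List Char) (s : String) :
    l.foldl (fun acc c => acc.push (f c)) s = s ++ String.ofList (l.map f) := by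
  induction l generalizing s with
  | nil => simp
  | cons c l ih =>
      simp only [List.foldl_cons, List.map_cons, ih]
      apply String.toList_injective
      simp

-- ===== VERDICT (by name: the statement is the Claim_ definition above) =====
theorem atbash_cipher_spec : Claim_equal_atbash_cipher := by
  intro text hdom
  unfold Spec_atbash_cipher atbash_cipher atbash_cipher_alt
  simp only [pvFoldl_push]
  refine congrArg _ ?_
  have : text.toList.map pvAStep = text.toList.map (fun c => (pvTable.get? c).getD c) := by
    apply List.map_congr_left
    intro c hc
    have hd : pvDomChar c = true := by
      have := (List.all_eq_true.mp hdom) c hc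
      exact this
    have hlt : c.toNat < 128 := by
      simp only [pvDomChar, Bool.or_eq_true, Bool.and_eq_true, decide_eq_true_eq,
        beq_iff_eq] at hd
      omega
    exact pvStep_eq_table c hlt
  rw [this]
  apply String.toList_injective
  simp
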